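-- pv_equiv track=rewrite | github.com/dragonoverlord3000/Kaeple | utils/reaction_info_utils.py | states_of_matter_in_reaction
-- ===== SOURCE A (Python) =====
-- def states_of_matter_in_reaction(compound_list):
--     """
--     Args:
--         compund_list (list) - list of compounds - can be capitalized or non-capitalized
--
--     Returns (bool):
--         True - if there are states of matter in any compound in the given compound list
--         False - if there aren't states of matter in any compound in the given compound list
--
--     Example:
--         >>>states_of_matter_in_reaction(["h2o(g)", "C6H12O6(aq)", "CH3CH2(CHO)CH3(heptane)"])
--         True
--         >>>states_of_matter_in_reaction(["h2o", "C6H12O6", "CH3CH2(CHO)CH3"])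
--         False
--     """
--
--     for compound in compound_list:
--         number_of_left = 0
--         number_of_right = 0
--
--         first = True
--
--         for char in reversed(compound):
--             if first and (char != ")"):
--                 break
--
--             elif first:
--                 first = False
--                 number_of_right += 1
--
--             elif char.isupper():
--                 break
--
--             elif char == ")":
--                 number_of_right += 1
--
--             elif char == "(":
--                 number_of_left += 1
--
--             if number_of_right == number_of_left:
--                 return True
--
--
--     return False
-- ===== SOURCE B (Python) =====
-- def states_of_matter_in_reaction(compound_list):
--     for compound in compound_list:
--         if not compound.endswith(")"):
--             continue
--         # left-to-right pass with a stack of '(' positions; after the pass,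
--         # start is the position matching the final ')' (None if unmatched)
--         stack = []
--         start = None
--         for i, ch in enumerate(compound):
--             if ch == "(":
--                 stack.append(i)
--             elif ch == ")":
--                 start = stack.pop() if stack else None
--         if start is not None and not any(ch.isupper() for ch in compound[start:]):
--             return True
--     return False
-- ===== Notes on version B (the rewrite author's own statement) =====
-- stated objective: alternative
-- what changed: Replaces A's single right-to-left fused scan with two balance counters, a 'first' flag and a mid-loop equality test by an endswith(')') guard, a LEFT-TO-RIGHT pass that keeps a stack of '(' positions (the match of the final ')' is the last pop), and a separate no-uppercase pass over the trailing slice.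
import Mathlib
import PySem

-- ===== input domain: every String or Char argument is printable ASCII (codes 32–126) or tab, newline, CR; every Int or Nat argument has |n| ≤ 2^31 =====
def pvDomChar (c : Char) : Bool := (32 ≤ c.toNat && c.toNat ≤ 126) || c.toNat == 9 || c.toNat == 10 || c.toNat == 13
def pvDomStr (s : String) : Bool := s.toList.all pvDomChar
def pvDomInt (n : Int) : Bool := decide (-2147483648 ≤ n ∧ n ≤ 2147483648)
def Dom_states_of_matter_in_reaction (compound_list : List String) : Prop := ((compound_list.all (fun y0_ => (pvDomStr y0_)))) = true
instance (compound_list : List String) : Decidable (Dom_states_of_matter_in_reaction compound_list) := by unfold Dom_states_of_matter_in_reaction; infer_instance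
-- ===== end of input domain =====

-- B replaces A's fused backward counter loop by an endswith guard, a LEFT-TO-RIGHT pass keeping a
-- stack of '(' positions (the final ')''s match is the last pop) and a separate no-uppercase pass
-- over the slice (objective: alternative); equal on all inputs (A is total).

-- ===== PORT A =====
-- inner 'for char in reversed(compound)' loop of A, over the reversed char list,
-- state (number_of_left, number_of_right, first); returns whether 'return True' fired
def pyLoopA (cs : List Char) (nl nr : Int) (first : Bool) : Bool :=
  match cs with
  | [] => false
  | c :: rest =>
    if first && !(c == ')') then false
    else if first then
      (if nr + 1 == nl then true else pyLoopA rest nl (nr + 1) false)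
    else if PySem.Chars.isupper c then false
    else if c == ')' then
      (if nr + 1 == nl then true else pyLoopA rest nl (nr + 1) first)
    else if c == '(' then
      (if nr == nl + 1 then true else pyLoopA rest (nl + 1) nr first)
    else (if nr == nl then true else pyLoopA rest nl nr first)

def states_of_matter_in_reaction (compound_list : List String) : Bool :=
  compound_list.any (fun compound => pyLoopA compound.toList.reverse 0 0 true)

-- ===== PORT B =====
-- Source B's 'for i, ch in enumerate(compound)' loop: left-to-right, stack of '(' indices (front = top),
-- 'start' = result of the most recent pop (Source B's 'stack.pop() if stack else None')
def fwdScan (cs : List Char) (i : Nat) (stack : List Nat) (start : Option Nat) :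
    List Nat × Option Nat :=
  match cs with
  | [] => (stack, start)
  | c :: rest =>
    if c = '(' then fwdScan rest (i + 1) (i :: stack) start
    else if c = ')' then
      match stack with
      | [] => fwdScan rest (i + 1) [] none
      | j :: stack' => fwdScan rest (i + 1) stack' (some j)
    else fwdScan rest (i + 1) stack start

-- Source B's per-compound body; compound[start:] with 0 ≤ start < len is exactly List.drop start
def compoundCheck (compound : String) : Bool :=
  if PySem.Str.endswith compound ")" then
    match (fwdScan compound.toList 0 [] none).2 with
    | some j => !(compound.toList.drop j).any (fun ch => PySem.Chars.isupper ch)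
    | none => false
  else false

def states_of_matter_in_reaction_alt (compound_list : List String) : Bool :=
  compound_list.any (fun compound => compoundCheck compound)

-- ===== PRECONDITION & SPEC =====
def Spec_states_of_matter_in_reaction (compound_list : List String) (out : Bool) : Prop := out = states_of_matter_in_reaction_alt compound_list
instance (compound_list : List String) (out : Bool) : Decidable (Spec_states_of_matter_in_reaction compound_list out) := by unfold Spec_states_of_matter_in_reaction; infer_instance

-- ===== CLAIM (what is proved, stated in full; the proofs are below) =====
def Claim_equal_states_of_matter_in_reaction : Prop := ∀ (compound_list : List String), Dom_states_of_matter_in_reaction compound_list → Spec_states_of_matter_in_reaction compound_list (states_of_matter_in_reaction compound_list)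

-- ===== LEMMAS AND PROOFS =====

-- proof-only middle characterisation of A's fused loop: backward scan with one depth counter
-- returning the chars from the end down to the matching '(' (in reversed order)
def findParenSub (cs : List Char) (depth : Int) : Option (List Char) :=
  match cs with
  | [] => none
  | c :: rest =>
    let d := if c == ')' then depth + 1 else if c == '(' then depth - 1 else depth
    if c == '(' && d == 0 then some [c]
    else (findParenSub rest d).map (fun sub => c :: sub)

def checkSub (o : Option (List Char)) : Bool :=
  match o with
  | some sub => !sub.any (fun ch => PySem.Chars.isupper ch)
  | none => false

-- A's fused loop after the first character, with nr - nl ≥ 1, computes 'matching paren found with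
-- no uppercase on the way' exactly as the backward characterisation does
lemma loop_eq (cs : List Char) : ∀ nl nr : Int, 1 ≤ nr - nl →
    pyLoopA cs nl nr false = checkSub (findParenSub cs (nr - nl)) := by
  induction cs with
  | nil => intro nl nr _; simp [pyLoopA, findParenSub, checkSub]
  | cons c rest ih =>
    intro nl nr h
    by_cases hr : c = ')'
    · subst hr
      have hih := ih nl (nr + 1) (by omega)
      have h2 : nr + 1 - nl = nr - nl + 1 := by ring
      rw [h2] at hih
      have h1 : ¬ (nr + 1 = nl) := by omega
      rcases hfs : findParenSub rest (nr - nl + 1) with _ | sub <;>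
        simp_all [pyLoopA, findParenSub, checkSub,
          show (PySem.Chars.isupper ')') = false by decide]
    · by_cases hl : c = '('
      · subst hl
        by_cases he : nr = nl + 1
        · simp [pyLoopA, findParenSub, checkSub, he,
            show (PySem.Chars.isupper '(') = false by decide]
        · have hih := ih (nl + 1) nr (by omega)
          have h2 : nr - nl - 1 = nr - (nl + 1) := by ring
          have hd0 : ¬ (nr - nl - 1 = 0) := by omega
          rcases hfs : findParenSub rest (nr - (nl + 1)) with _ | sub <;>
            simp_all [pyLoopA, findParenSub, checkSub,
              show (PySem.Chars.isupper '(') = false by decide]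
      · by_cases hu : PySem.Chars.isupper c = true
        · have hr' : ¬ (c = ')') := hr
          rcases hfs : findParenSub rest (nr - nl) with _ | sub <;>
            simp_all [pyLoopA, findParenSub, checkSub]
        · have hu' : PySem.Chars.isupper c = false := by
            cases hx : PySem.Chars.isupper c
            · rfl
            · exact absurd hx hu
          have hih := ih nl nr h
          have hne : ¬ (nr = nl) := by omega
          rcases hfs : findParenSub rest (nr - nl) with _ | sub <;>
            simp_all [pyLoopA, findParenSub, checkSub]

-- fwdScan splits over append
lemma fwdScan_append (xs ys : List Char) : ∀ i st l,
    fwdScan (xs ++ ys) i st l =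
      fwdScan ys (i + xs.length) (fwdScan xs i st l).1 (fwdScan xs i st l).2 := by
  induction xs with
  | nil => intro i st l; simp [fwdScan]
  | cons c rest ih =>
    intro i st l
    by_cases h1 : c = '('
    · simp [fwdScan, h1, ih]; ring_nf
    · by_cases h2 : c = ')'
      · cases st with
        | nil => simp [fwdScan, h2, ih]; ring_nf
        | cons j st' => simp [fwdScan, h2, ih]; ring_nf
      · simp [fwdScan, h1, h2, ih]; ring_nf

-- stack-element bound: everything on the stack is an already-seen index
lemma fwdScan_bound (cs : List Char) : ∀ i st l, (∀ j ∈ st, j < i) →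
    ∀ j ∈ (fwdScan cs i st l).1, j < i + cs.length := by
  induction cs with
  | nil => intro i st l hst j hj; simpa [fwdScan] using Nat.lt_of_lt_of_le (hst j hj) (by omega)
  | cons c rest ih =>
    intro i st l hst j hj
    by_cases h1 : c = '('
    · simp only [fwdScan, h1, if_pos] at hj
      have := ih (i + 1) (i :: st) l (by
        intro k hk
        rcases List.mem_cons.mp hk with h | h
        · omega
        · exact Nat.lt_succ_of_lt (hst k h)) j hj
      simpa [Nat.add_comm, Nat.add_left_comm] using this
    · by_cases h2 : c = ')'
      · cases st with
        | nil =>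
          simp only [fwdScan, h2, if_pos] at hj
          have := ih (i + 1) [] none (by simp) j hj
          simpa [Nat.add_comm, Nat.add_left_comm] using this
        | cons j0 st' =>
          simp only [fwdScan, h2, if_pos] at hj
          have := ih (i + 1) st' (some j0) (by
            intro k hk
            exact Nat.lt_succ_of_lt (hst k (List.mem_cons_of_mem _ hk))) j hj
          simpa [Nat.add_comm, Nat.add_left_comm] using this
      · simp only [fwdScan, h1, h2] at hj
        have := ih (i + 1) st l (fun k hk => Nat.lt_succ_of_lt (hst k hk)) j hj
        simpa [Nat.add_comm, Nat.add_left_comm] using this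

-- the stack after scanning cs from the start
def stk (cs : List Char) : List Nat := (fwdScan cs 0 [] none).1

lemma stk_lt (cs : List Char) : ∀ j ∈ stk cs, j < cs.length := by
  intro j hj
  simpa using fwdScan_bound cs 0 [] none (by simp) j hj

lemma stk_snoc (cs : List Char) (c : Char) :
    stk (cs ++ [c]) = if c = '(' then cs.length :: stk cs
      else if c = ')' then (stk cs).tail else stk cs := by
  unfold stk
  rw [fwdScan_append]
  by_cases h1 : c = '('
  · simp [fwdScan, h1]
  · by_cases h2 : c = ')'
    · cases hst : (fwdScan cs 0 [] none).1 with
      | nil => simp [fwdScan, h2]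
      | cons j st' => simp [fwdScan, h2]
    · simp [fwdScan, h1, h2]

lemma last_snoc_close (cs : List Char) :
    (fwdScan (cs ++ [')']) 0 [] none).2 = (stk cs).head? := by
  rw [fwdScan_append]
  cases hst : (fwdScan cs 0 [] none).1 with
  | nil => simp [fwdScan, stk, hst]
  | cons j st' => simp [fwdScan, stk, hst]

lemma drop_snoc (cs : List Char) (c : Char) (j : Nat) (hj : j ≤ cs.length) :
    ((cs ++ [c]).drop j).reverse = c :: (cs.drop j).reverse := by
  rw [List.drop_append_of_le_length hj]
  simp

-- the backward single-counter characterisation equals the forward stack: depth n+1 looks for the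
-- (n+1)-st unmatched '(' from the right, i.e. the stack's n-th entry
lemma back_eq_stack (cs : List Char) : ∀ n : Nat,
    findParenSub cs.reverse ((n : Int) + 1) =
      ((stk cs)[n]?).map (fun j => ((cs.drop j).reverse : List Char)) := by
  induction cs using List.reverseRecOn with
  | nil => intro n; simp [findParenSub, stk, fwdScan]
  | append_singleton cs c ih =>
    intro n
    rw [List.reverse_append, List.reverse_singleton, List.singleton_append]
    by_cases h1 : c = '('
    · subst h1
      rcases n with _ | m
      · simp [findParenSub, stk_snoc]
      · have hih := ih m
        rw [stk_snoc]
        have hcast : ((m : Int) + 1 + 1 - 1) = (m : Int) + 1 := by ring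
        rcases hst : (stk cs)[m]? with _ | j
        · simp [findParenSub, hcast, hst, hih]
          omega
        · have hj : j ≤ cs.length := Nat.le_of_lt (stk_lt cs j (by
            have := List.getElem?_eq_some_iff.mp hst
            exact List.mem_of_getElem (this.choose_spec)))
          simp [findParenSub, hcast, hst, hih, drop_snoc cs '(' j hj]
          omega
    · by_cases h2 : c = ')'
      · subst h2
        have hih := ih (n + 1)
        rw [stk_snoc]
        have hcast : ((n : Int) + 1 + 1) = ((n + 1 : Nat) : Int) + 1 := by push_cast; ring
        rcases hst : (stk cs)[n + 1]? with _ | j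
        · simp [findParenSub, hcast, hst, hih]
        · have hj : j ≤ cs.length := Nat.le_of_lt (stk_lt cs j (by
            have := List.getElem?_eq_some_iff.mp hst
            exact List.mem_of_getElem (this.choose_spec)))
          simp [findParenSub, hcast, hst, hih, drop_snoc cs ')' j hj]
      · have hih := ih n
        rw [stk_snoc]
        rcases hst : (stk cs)[n]? with _ | j
        · simp [findParenSub, h1, h2, hst, hih]
        · have hj : j ≤ cs.length := Nat.le_of_lt (stk_lt cs j (by
            have := List.getElem?_eq_some_iff.mp hst
            exact List.mem_of_getElem (this.choose_spec)))
          simp [findParenSub, h1, h2, hst, hih, drop_snoc cs c j hj]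

-- A's per-compound loop in terms of the backward characterisation (proof-only bridge)
lemma compound_eq_back (compound : String) :
    pyLoopA compound.toList.reverse 0 0 true =
      (match compound.toList.reverse with
       | [] => false
       | c :: rest => if c = ')' then checkSub (findParenSub (c :: rest) 0) else false) := by
  cases hc : compound.toList.reverse with
  | nil => simp [pyLoopA]
  | cons c rest =>
    by_cases hr : c = ')'
    · subst hr
      have hih := loop_eq rest 0 1 (by omega)
      norm_num at hih
      rcases hfs : findParenSub rest 1 with _ | sub <;>
        simp_all [pyLoopA, findParenSub, checkSub,
          show (PySem.Chars.isupper ')') = false by decide]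
    · simp [pyLoopA, hr]

-- and the backward characterisation is exactly Source B's forward-stack check
lemma compound_eq (compound : String) :
    pyLoopA compound.toList.reverse 0 0 true = compoundCheck compound := by
  have hA := compound_eq_back compound
  unfold compoundCheck
  cases hc : compound.toList.reverse with
  | nil =>
    rw [hc] at hA
    simp only at hA
    rw [hA]
    have hnil : compound.toList = [] := by
      have := congrArg List.reverse hc; simpa using this
    have hce : PySem.Chars.endswith compound.toList [')'] = false := by
      rw [hnil]; decide
    simp [hce, show (")" : String).toList = [')'] from rfl]
  | cons c rest =>
    rw [hc] at hA
    simp only at hA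
    rw [hA]
    have hsplit : compound.toList = rest.reverse ++ [c] := by
      have := congrArg List.reverse hc; simpa using this
    by_cases hr : c = ')'
    · subst hr
      have hendc : PySem.Chars.endswith compound.toList [')'] = true :=
        (PySem.Chars.endswith_iff _ _).mpr ⟨rest.reverse, hsplit.symm⟩
      -- unfold one backward step: leading ')' raises the depth to 1
      have hstep : findParenSub (')' :: rest) 0 =
          (findParenSub rest 1).map (fun sub => ')' :: sub) := by
        simp [findParenSub]
      have hback := back_eq_stack rest.reverse 0
      rw [List.reverse_reverse] at hback
      norm_num at hback
      have hlast := last_snoc_close rest.reverse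
      rw [← hsplit] at hlast
      rw [hstep, hback]
      rcases hst : (stk rest.reverse)[0]? with _ | j
      · have hh : (fwdScan compound.toList 0 [] none).2 = none := by
          rw [hlast]
          cases hx : stk rest.reverse
          · simp
          · simp [hx] at hst
        simp [checkSub, hh, hendc]
      · have hh : (fwdScan compound.toList 0 [] none).2 = some j := by
          rw [hlast]
          cases hx : stk rest.reverse
          · simp [hx] at hst
          · simp [hx] at hst; simp [hst]
        have hj : j ≤ rest.reverse.length := Nat.le_of_lt (stk_lt _ j (by
          have := List.getElem?_eq_some_iff.mp hst
          exact List.mem_of_getElem (this.choose_spec)))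
        simp only [checkSub, Option.map_some, hh]
        rw [hsplit, List.drop_append_of_le_length hj]
        simp [show (PySem.Chars.isupper ')') = false by decide, List.any_reverse, hendc]
    · have hce : PySem.Chars.endswith compound.toList [')'] = false := by
        by_contra hx
        have ht : PySem.Chars.endswith compound.toList [')'] = true := by
          cases hy : PySem.Chars.endswith compound.toList [')']
          · exact absurd hy hx
          · rfl
        rcases (PySem.Chars.endswith_iff _ _).mp ht with ⟨t, hts⟩
        rw [hsplit] at hts
        have := congrArg List.reverse hts
        simp at this
        exact hr this.1.symm
      simp [hce, hr, show (")" : String).toList = [')'] from rfl]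

-- ===== VERDICT (by name: the statement is the Claim_ definition above) =====
theorem states_of_matter_in_reaction_spec : Claim_equal_states_of_matter_in_reaction := by
  intro l _
  unfold Spec_states_of_matter_in_reaction states_of_matter_in_reaction states_of_matter_in_reaction_alt
  rw [funext compound_eq]
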